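-- pv_equiv track=rewrite | github.com/kpbianco/notion-eng | tools/verify_no_prose_changes.py | remove_duplicate_first_h1
-- ===== SOURCE A (Python) =====
-- def remove_duplicate_first_h1(lines: list[str]) -> list[str]:
--     first_h1 = None
--     out = []
--     for line in lines:
--         if first_h1 is None and line.startswith('# '):
--             first_h1 = line
--             out.append(line)
--             continue
--         if first_h1 and line == first_h1:
--             continue
--         out.append(line)
--     return out
-- ===== SOURCE B (Python) =====
-- def remove_duplicate_first_h1(lines: list[str]) -> list[str]:
--     target = next((l for l in lines if l.startswith('# ')), None)
--     if target is None:
--         return list(lines)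
--     remaining = lines.count(target)
--     out = []
--     for line in reversed(lines):
--         if line == target and remaining > 1:
--             remaining -= 1
--         else:
--             out.append(line)
--     out.reverse()
--     return out
-- ===== Notes on version B (the rewrite author's own statement) =====
-- stated objective: alternative
-- what changed: Instead of A's forward stateful loop with a first_h1 sentinel, B counts the occurrences of the first H1 line and then walks the list BACK-TO-FRONT, dropping occurrences from the end while more than one remains, finally reversing the accumulator.
import Mathlib
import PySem

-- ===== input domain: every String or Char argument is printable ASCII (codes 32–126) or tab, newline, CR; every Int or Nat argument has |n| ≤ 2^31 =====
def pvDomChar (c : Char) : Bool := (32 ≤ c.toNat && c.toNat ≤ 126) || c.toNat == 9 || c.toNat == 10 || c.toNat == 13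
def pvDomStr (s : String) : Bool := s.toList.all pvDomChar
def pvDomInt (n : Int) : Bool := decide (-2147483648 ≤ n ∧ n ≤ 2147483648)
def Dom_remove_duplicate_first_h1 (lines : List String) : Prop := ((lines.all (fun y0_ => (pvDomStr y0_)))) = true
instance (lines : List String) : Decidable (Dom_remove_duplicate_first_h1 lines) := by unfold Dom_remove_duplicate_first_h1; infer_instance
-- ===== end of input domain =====

-- B replaces A's forward loop with a first_h1 sentinel by: count the occurrences of the first
-- H1 line, then walk the list BACK-TO-FRONT dropping occurrences from the end while more than
-- one remains, and reverse the accumulator; objective: alternative (same cost, different traversal).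

-- ===== PORT A =====
-- one iteration of A's loop over state (first_h1, out); `some h` with h ≠ "" is Python's truthiness of first_h1
def pvAStep (st : Option String × List String) (line : String) : Option String × List String :=
  match st with
  | (none, out) =>
      if PySem.Str.startswith line "# " then (some line, out ++ [line]) else (none, out ++ [line])
  | (some h, out) =>
      if h ≠ "" ∧ line = h then (some h, out) else (some h, out ++ [line])

def remove_duplicate_first_h1 (lines : List String) : List String :=
  (lines.foldl pvAStep (none, [])).2

-- ===== PORT B =====
-- one iteration of B's backward loop over state (remaining, out)
def pvBStep (target : String) (st : Int × List String) (line : String) : Int × List String :=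
  if line = target ∧ st.1 > 1 then (st.1 - 1, st.2) else (st.1, st.2 ++ [line])

def remove_duplicate_first_h1_alt (lines : List String) : List String :=
  match lines.find? (fun l => PySem.Str.startswith l "# ") with   -- next((l for l in lines if …), None)
  | none => lines
  | some target =>
      let remaining : Int := PySem.List.count lines target
      let st := lines.reverse.foldl (pvBStep target) (remaining, [])   -- for line in reversed(lines)
      st.2.reverse                                                      -- out.reverse()

-- ===== PRECONDITION & SPEC =====
def Spec_remove_duplicate_first_h1 (lines : List String) (out : List String) : Prop := out = remove_duplicate_first_h1_alt lines
instance (lines : List String) (out : List String) : Decidable (Spec_remove_duplicate_first_h1 lines out) := by unfold Spec_remove_duplicate_first_h1; infer_instance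

-- ===== CLAIM (what is proved, stated in full; the proofs are below) =====
def Claim_equal_remove_duplicate_first_h1 : Prop := ∀ (lines : List String), Dom_remove_duplicate_first_h1 lines → Spec_remove_duplicate_first_h1 lines (remove_duplicate_first_h1 lines)

-- ===== LEMMAS AND PROOFS =====

-- common reference function both ports are proved equal to: keep everything up to and including
-- the first '# ' line, then filter the tail
def pvSpecFn : List String → List String
  | [] => []
  | head :: rest =>
      if PySem.Str.startswith head "# " then
        head :: rest.filter (fun l => l ≠ head)
      else
        head :: pvSpecFn rest

-- a line starting with '# ' is nonempty, hence truthy in Python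
lemma startswith_h1_ne_empty (s : String) (h : PySem.Str.startswith s "# " = true) : s ≠ "" := by
  intro he; subst he; exact absurd h (by decide)

-- once first_h1 = some h (h ≠ ""), A's loop only filters out lines equal to h
lemma foldl_some (h : String) (hne : h ≠ "") (rest : List String) (out : List String) :
    rest.foldl pvAStep (some h, out) = (some h, out ++ rest.filter (fun l => l ≠ h)) := by
  induction rest generalizing out with
  | nil => simp
  | cons x xs ih =>
      by_cases hx : x = h
      · subst hx
        simp [List.foldl, pvAStep, hne, ih]
      · simp [List.foldl, pvAStep, hx, ih]

lemma foldl_none (lines : List String) (out : List String) :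
    (lines.foldl pvAStep (none, out)).2 = out ++ pvSpecFn lines := by
  induction lines generalizing out with
  | nil => simp [pvSpecFn]
  | cons x xs ih =>
      by_cases hx : PySem.Str.startswith x "# " = true
      · have hx' : PySem.Chars.startswith x.toList ['#', ' '] = true := by
          simpa [PySem.Str.startswith] using hx
        simp [List.foldl, pvAStep, PySem.Str.startswith, hx', pvSpecFn,
          foldl_some x (startswith_h1_ne_empty x hx) xs]
      · have hx' : ¬ PySem.Chars.startswith x.toList ['#', ' '] = true := by
          simpa [PySem.Str.startswith] using hx
        simp [List.foldl, pvAStep, PySem.Str.startswith, hx', pvSpecFn, ih]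

-- B's backward pass, read as a foldr from the front: while the remaining count exceeds the number
-- of occurrences still to the left, every occurrence of target is dropped
lemma foldr_gt_count (target : String) (xs : List String) (c : Int) (acc : List String)
    (hc : (List.count target xs : Int) < c) :
    xs.foldr (fun x y => pvBStep target y x) (c, acc)
      = (c - (List.count target xs : Int), acc ++ (xs.filter (fun l => l ≠ target)).reverse) := by
  induction xs generalizing acc with
  | nil => simp
  | cons x xs ih =>
      rcases eq_or_ne x target with h | h
      · have hcount : (List.count target (x :: xs) : Int) = (List.count target xs : Int) + 1 := by
          simp [h]
        have hxs : (List.count target xs : Int) < c := by omega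
        have hgt : c - (List.count target xs : Int) > 1 := by omega
        rw [List.foldr_cons, ih _ hxs]
        simp [pvBStep, h, hgt]
        omega
      · have hcount : (List.count target (x :: xs) : Int) = (List.count target xs : Int) := by
          simp [h]
        have hxs : (List.count target xs : Int) < c := by omega
        rw [List.foldr_cons, ih _ hxs]
        simp [pvBStep, h]

-- find? returns none ⇒ the reference function is the identity
lemma pvSpecFn_of_no_h1 (lines : List String)
    (h : ∀ l ∈ lines, ¬ PySem.Str.startswith l "# " = true) : pvSpecFn lines = lines := by
  induction lines with
  | nil => rfl
  | cons x xs ih =>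
      have hx : ¬ PySem.Chars.startswith x.toList ['#', ' '] = true := by
        simpa [PySem.Str.startswith] using h x (by simp)
      simp [pvSpecFn, PySem.Str.startswith, hx, ih (fun l hl => h l (by simp [hl]))]

-- B's port equals the reference function
lemma alt_eq_specFn (lines : List String) : remove_duplicate_first_h1_alt lines = pvSpecFn lines := by
  induction lines with
  | nil => rfl
  | cons x xs ih =>
      by_cases hx : PySem.Str.startswith x "# " = true
      · have hx' : PySem.Chars.startswith x.toList ['#', ' '] = true := by
          simpa [PySem.Str.startswith] using hx
        have hfind : (x :: xs).find? (fun l => PySem.Str.startswith l "# ") = some x :=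
          List.find?_cons_of_pos (by simpa using hx)
        have hc : (List.count x xs : Int) < (List.count x (x :: xs) : Int) := by
          simp
        have hfold := foldr_gt_count x xs ((List.count x (x :: xs) : Nat) : Int) [] hc
        simp only [remove_duplicate_first_h1_alt, hfind, PySem.List.count_eq,
          List.foldl_reverse, List.foldr_cons]
        rw [hfold]
        simp [pvBStep, pvSpecFn, PySem.Str.startswith, hx']
      · have hx' : ¬ PySem.Chars.startswith x.toList ['#', ' '] = true := by
          simpa [PySem.Str.startswith] using hx
        cases hfind : xs.find? (fun l => PySem.Str.startswith l "# ") with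
        | none =>
            have hnone : (x :: xs).find? (fun l => PySem.Str.startswith l "# ") = none :=
              by rw [List.find?_cons_of_neg (by simpa using hx), hfind]
            have hall : ∀ l ∈ x :: xs, ¬ PySem.Str.startswith l "# " = true := by
              have hn := List.find?_eq_none.mp hnone
              intro l hl; simpa using hn l hl
            simp only [remove_duplicate_first_h1_alt, hnone]
            exact (pvSpecFn_of_no_h1 _ hall).symm
        | some t =>
            have hfind' : (x :: xs).find? (fun l => PySem.Str.startswith l "# ") = some t :=
              by rw [List.find?_cons_of_neg (by simpa using hx), hfind]
            have ht : PySem.Str.startswith t "# " = true := by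
              simpa using List.find?_some hfind
            have hxt : x ≠ t := by intro he; exact hx (he ▸ ht)
            have hcnt : ((List.count t (x :: xs) : Nat) : Int) = (List.count t xs : Int) := by
              simp [hxt]
            have ihx := ih
            simp only [remove_duplicate_first_h1_alt, hfind, hfind', PySem.List.count_eq,
              List.foldl_reverse, List.foldr_cons] at ihx ⊢
            rw [hcnt]
            cases hst : xs.foldr (fun x y => pvBStep t y x) ((List.count t xs : Int), []) with
            | mk r out =>
                rw [hst] at ihx
                simp only at ihx
                simp [pvBStep, hxt, pvSpecFn, PySem.Str.startswith, hx', ← ihx]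

-- ===== VERDICT (by name: the statement is the Claim_ definition above) =====
theorem remove_duplicate_first_h1_spec : Claim_equal_remove_duplicate_first_h1 := by
  intro lines _
  show _ = _
  rw [alt_eq_specFn]
  simpa using foldl_none lines []
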